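-- pv_equiv track=rewrite | github.com/Lucineer/I-know-kung-fu | tolerance-of-error-framework/src/output_comparator.py | _behaviors_match
-- ===== SOURCE A (Python) =====
-- def _behaviors_match(behavior1: str, behavior2: str) -> bool:
--     """Check if two behaviors match."""
--     if behavior1 == behavior2:
--         return True
--
--     # Define equivalence classes
--     equivalence_classes = [
--         {'create', 'generate', 'make'},
--         {'read', 'extract', 'fetch'},
--         {'update', 'modify', 'change'},
--         {'unknown', 'neutral'},
--         {'document', 'file'},
--         {'success', 'result'},
--     ]
--
--     for eq_class in equivalence_classes:
--         if behavior1 in eq_class and behavior2 in eq_class: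
--             return True
--
--     return False
-- ===== SOURCE B (Python) =====
-- _CLASSES = [
--     ('create', 'generate', 'make'),
--     ('read', 'extract', 'fetch'),
--     ('update', 'modify', 'change'),
--     ('unknown', 'neutral'),
--     ('document', 'file'),
--     ('success', 'result'),
-- ]
-- _WORD_TO_CLASS = {w: i for i, cls in enumerate(_CLASSES) for w in cls}
--
--
-- def _behaviors_match(behavior1: str, behavior2: str) -> bool:
--     """Check if two behaviors match."""
--     if behavior1 == behavior2:
--         return True
--     c1 = _WORD_TO_CLASS.get(behavior1)
--     return c1 is not None and c1 == _WORD_TO_CLASS.get(behavior2)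
-- ===== Notes on version B (the rewrite author's own statement) =====
-- stated objective: simpler
-- what changed: Replaced the per-class loop with two membership tests by a precomputed word-to-class-id dict built once at module load; the function body is a single lookup comparison with no loop.
import Mathlib
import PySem

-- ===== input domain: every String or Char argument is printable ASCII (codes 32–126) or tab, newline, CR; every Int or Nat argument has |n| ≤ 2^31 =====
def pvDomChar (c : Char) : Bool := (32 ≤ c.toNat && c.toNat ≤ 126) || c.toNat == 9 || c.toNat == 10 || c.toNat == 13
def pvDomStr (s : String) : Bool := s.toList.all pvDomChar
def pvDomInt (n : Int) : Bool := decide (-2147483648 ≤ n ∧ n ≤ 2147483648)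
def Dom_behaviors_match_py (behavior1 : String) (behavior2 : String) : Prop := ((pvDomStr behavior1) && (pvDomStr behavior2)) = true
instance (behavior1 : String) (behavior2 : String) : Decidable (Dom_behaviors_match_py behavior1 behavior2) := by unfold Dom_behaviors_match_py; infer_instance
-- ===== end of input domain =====

-- B replaces A's per-class scan by one precomputed word→class-id table and a single
-- lookup comparison (objective: simpler); return values are proved identical everywhere.

-- ===== PORT A =====
-- the for-loop with early 'return True' over the equivalence classes
def bmLoop (behavior1 : String) (behavior2 : String) : List (PySem.Set String) → Bool
  | [] => false
  | eq_class :: rest =>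
      if PySem.Set.contains eq_class behavior1 && PySem.Set.contains eq_class behavior2 then true
      else bmLoop behavior1 behavior2 rest

def behaviors_match_py (behavior1 : String) (behavior2 : String) : Bool :=
  if behavior1 == behavior2 then true
  else
    let equivalence_classes : List (PySem.Set String) :=
      [ PySem.Set.ofList ["create", "generate", "make"],
        PySem.Set.ofList ["read", "extract", "fetch"],
        PySem.Set.ofList ["update", "modify", "change"],
        PySem.Set.ofList ["unknown", "neutral"],
        PySem.Set.ofList ["document", "file"],
        PySem.Set.ofList ["success", "result"] ]
    bmLoop behavior1 behavior2 equivalence_classes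

-- ===== PORT B =====
-- the module-level dict {word: class id} built once from the class list
def bmWordToClass : PySem.Dict String Int :=
  PySem.Dict.ofList
    [ ("create", 0), ("generate", 0), ("make", 0),
      ("read", 1), ("extract", 1), ("fetch", 1),
      ("update", 2), ("modify", 2), ("change", 2),
      ("unknown", 3), ("neutral", 3),
      ("document", 4), ("file", 4),
      ("success", 5), ("result", 5) ]

def behaviors_match_py_alt (behavior1 : String) (behavior2 : String) : Bool :=
  if behavior1 == behavior2 then true
  else
    match PySem.Dict.get? bmWordToClass behavior1 with
    | none => false
    | some c1 => PySem.Dict.get? bmWordToClass behavior2 == some c1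

-- ===== PRECONDITION & SPEC =====
def Spec_behaviors_match_py (behavior1 : String) (behavior2 : String) (out : Bool) : Prop := out = behaviors_match_py_alt behavior1 behavior2
instance (behavior1 : String) (behavior2 : String) (out : Bool) : Decidable (Spec_behaviors_match_py behavior1 behavior2 out) := by unfold Spec_behaviors_match_py; infer_instance

-- ===== CLAIM (what is proved, stated in full; the proofs are below) =====
def Claim_equal_behaviors_match_py : Prop := ∀ (behavior1 : String) (behavior2 : String), Dom_behaviors_match_py behavior1 behavior2 → Spec_behaviors_match_py behavior1 behavior2 (behaviors_match_py behavior1 behavior2)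

-- ===== LEMMAS AND PROOFS =====

-- every string is one of the 15 class words or none of them
theorem bm_word_cases (b : String) : b = "create" ∨ b = "generate" ∨ b = "make" ∨ b = "read" ∨ b = "extract" ∨ b = "fetch" ∨ b = "update" ∨ b = "modify" ∨ b = "change" ∨ b = "unknown" ∨ b = "neutral" ∨ b = "document" ∨ b = "file" ∨ b = "success" ∨ b = "result" ∨ (b ≠ "create" ∧ "create" ≠ b ∧ b ≠ "generate" ∧ "generate" ≠ b ∧ b ≠ "make" ∧ "make" ≠ b ∧ b ≠ "read" ∧ "read" ≠ b ∧ b ≠ "extract" ∧ "extract" ≠ b ∧ b ≠ "fetch" ∧ "fetch" ≠ b ∧ b ≠ "update" ∧ "update" ≠ b ∧ b ≠ "modify" ∧ "modify" ≠ b ∧ b ≠ "change" ∧ "change" ≠ b ∧ b ≠ "unknown" ∧ "unknown" ≠ b ∧ b ≠ "neutral" ∧ "neutral" ≠ b ∧ b ≠ "document" ∧ "document" ≠ b ∧ b ≠ "file" ∧ "file" ≠ b ∧ b ≠ "success" ∧ "success" ≠ b ∧ b ≠ "result" ∧ "result" ≠ b) := by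
  rcases eq_or_ne b "create" with h|hcreate
  · exact Or.inl h
  rcases eq_or_ne b "generate" with h|hgenerate
  · exact Or.inr (Or.inl h)
  rcases eq_or_ne b "make" with h|hmake
  · exact Or.inr (Or.inr (Or.inl h))
  rcases eq_or_ne b "read" with h|hread
  · exact Or.inr (Or.inr (Or.inr (Or.inl h)))
  rcases eq_or_ne b "extract" with h|hextract
  · exact Or.inr (Or.inr (Or.inr (Or.inr (Or.inl h))))
  rcases eq_or_ne b "fetch" with h|hfetch
  · exact Or.inr (Or.inr (Or.inr (Or.inr (Or.inr (Or.inl h)))))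
  rcases eq_or_ne b "update" with h|hupdate
  · exact Or.inr (Or.inr (Or.inr (Or.inr (Or.inr (Or.inr (Or.inl h))))))
  rcases eq_or_ne b "modify" with h|hmodify
  · exact Or.inr (Or.inr (Or.inr (Or.inr (Or.inr (Or.inr (Or.inr (Or.inl h)))))))
  rcases eq_or_ne b "change" with h|hchange
  · exact Or.inr (Or.inr (Or.inr (Or.inr (Or.inr (Or.inr (Or.inr (Or.inr (Or.inl h))))))))
  rcases eq_or_ne b "unknown" with h|hunknown
  · exact Or.inr (Or.inr (Or.inr (Or.inr (Or.inr (Or.inr (Or.inr (Or.inr (Or.inr (Or.inl h)))))))))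
  rcases eq_or_ne b "neutral" with h|hneutral
  · exact Or.inr (Or.inr (Or.inr (Or.inr (Or.inr (Or.inr (Or.inr (Or.inr (Or.inr (Or.inr (Or.inl h))))))))))
  rcases eq_or_ne b "document" with h|hdocument
  · exact Or.inr (Or.inr (Or.inr (Or.inr (Or.inr (Or.inr (Or.inr (Or.inr (Or.inr (Or.inr (Or.inr (Or.inl h)))))))))))
  rcases eq_or_ne b "file" with h|hfile
  · exact Or.inr (Or.inr (Or.inr (Or.inr (Or.inr (Or.inr (Or.inr (Or.inr (Or.inr (Or.inr (Or.inr (Or.inr (Or.inl h))))))))))))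
  rcases eq_or_ne b "success" with h|hsuccess
  · exact Or.inr (Or.inr (Or.inr (Or.inr (Or.inr (Or.inr (Or.inr (Or.inr (Or.inr (Or.inr (Or.inr (Or.inr (Or.inr (Or.inl h)))))))))))))
  rcases eq_or_ne b "result" with h|hresult
  · exact Or.inr (Or.inr (Or.inr (Or.inr (Or.inr (Or.inr (Or.inr (Or.inr (Or.inr (Or.inr (Or.inr (Or.inr (Or.inr (Or.inr (Or.inl h))))))))))))))
  exact Or.inr (Or.inr (Or.inr (Or.inr (Or.inr (Or.inr (Or.inr (Or.inr (Or.inr (Or.inr (Or.inr (Or.inr (Or.inr (Or.inr (Or.inr (⟨hcreate, Ne.symm hcreate, hgenerate, Ne.symm hgenerate, hmake, Ne.symm hmake, hread, Ne.symm hread, hextract, Ne.symm hextract, hfetch, Ne.symm hfetch, hupdate, Ne.symm hupdate, hmodify, Ne.symm hmodify, hchange, Ne.symm hchange, hunknown, Ne.symm hunknown, hneutral, Ne.symm hneutral, hdocument, Ne.symm hdocument, hfile, Ne.symm hfile, hsuccess, Ne.symm hsuccess, hresult, Ne.symm hresult⟩)))))))))))))))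

-- the module table, evaluated to its literal association list
theorem bmWordToClass_eval : bmWordToClass = PySem.Dict.mk
    [ ("create", 0), ("generate", 0), ("make", 0),
      ("read", 1), ("extract", 1), ("fetch", 1),
      ("update", 2), ("modify", 2), ("change", 2),
      ("unknown", 3), ("neutral", 3),
      ("document", 4), ("file", 4),
      ("success", 5), ("result", 5) ] := by rfl

theorem bm_eq_case (b : String) : behaviors_match_py b b = behaviors_match_py_alt b b := by
  simp [behaviors_match_py, behaviors_match_py_alt]

-- ===== VERDICT (by name: the statement is the Claim_ definition above) =====
theorem behaviors_match_py_spec : Claim_equal_behaviors_match_py := by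
  intro b1 b2 _
  unfold Spec_behaviors_match_py
  by_cases e : b1 = b2
  · subst e; exact bm_eq_case b1
  · rcases bm_word_cases b1 with h1|h1|h1|h1|h1|h1|h1|h1|h1|h1|h1|h1|h1|h1|h1|⟨ncreate, n'create, ngenerate, n'generate, nmake, n'make, nread, n'read, nextract, n'extract, nfetch, n'fetch, nupdate, n'update, nmodify, n'modify, nchange, n'change, nunknown, n'unknown, nneutral, n'neutral, ndocument, n'document, nfile, n'file, nsuccess, n'success, nresult, n'result⟩ <;>
    rcases bm_word_cases b2 with h2|h2|h2|h2|h2|h2|h2|h2|h2|h2|h2|h2|h2|h2|h2|⟨mcreate, m'create, mgenerate, m'generate, mmake, m'make, mread, m'read, mextract, m'extract, mfetch, m'fetch, mupdate, m'update, mmodify, m'modify, mchange, m'change, munknown, m'unknown, mneutral, m'neutral, mdocument, m'document, mfile, m'file, msuccess, m'success, mresult, m'result⟩ <;>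
      first
      | (subst h1; subst h2; decide)
      | simp_all [behaviors_match_py, behaviors_match_py_alt, bmLoop, bmWordToClass_eval,
          PySem.Dict.get?, PySem.Set.contains]
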